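-- pv_equiv track=rewrite | github.com/KMORaza/leetcode-solutions | LeetCode Solutions/1504.py | calculate_submatrices
-- ===== SOURCE A (Python) =====
-- def calculate_submatrices(row):
--     count = 0
--     length = 0
--     for value in row:
--         if value == 0:
--             length = 0
--         else:
--             length += 1
--         count += length
--     return count
-- ===== SOURCE B (Python) =====
-- def calculate_submatrices(row):
--     total = 0
--     run = 0
--     for value in row:
--         if value == 0:
--             total += run * (run + 1) // 2
--             run = 0
--         else:
--             run += 1
--     return total + run * (run + 1) // 2
-- ===== Notes on version B (the rewrite author's own statement) =====
-- stated objective: alternative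
-- what changed: Instead of adding the running length at every element, B accumulates per maximal run of non-zero values the closed form L*(L+1)//2, flushed when a run ends and once after the loop.
import Mathlib
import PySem

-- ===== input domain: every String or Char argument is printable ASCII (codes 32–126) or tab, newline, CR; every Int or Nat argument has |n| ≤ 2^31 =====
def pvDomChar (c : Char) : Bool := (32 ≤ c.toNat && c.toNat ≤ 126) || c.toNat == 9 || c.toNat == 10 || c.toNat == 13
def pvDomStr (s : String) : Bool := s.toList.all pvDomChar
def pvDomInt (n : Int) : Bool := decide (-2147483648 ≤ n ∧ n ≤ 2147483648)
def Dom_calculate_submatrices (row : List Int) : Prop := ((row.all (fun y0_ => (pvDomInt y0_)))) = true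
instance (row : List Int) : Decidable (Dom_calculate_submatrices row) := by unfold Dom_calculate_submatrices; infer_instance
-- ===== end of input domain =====

-- B accumulates each maximal non-zero run's closed-form contribution L*(L+1)//2 instead of adding the running length at every element (alternative decomposition, same O(n) cost).


-- ===== PORT A =====
-- for value in row: if value == 0 then length := 0 else length += 1; count += length
def calculate_submatrices (row : List Int) : Int :=
  (row.foldl
    (fun (st : Int × Int) value =>
      let length := if value = 0 then 0 else st.2 + 1
      (st.1 + length, length))
    (0, 0)).1

-- ===== PORT B =====
-- for value in row: if value == 0 then flush run*(run+1)//2 and reset, else run += 1; flush final run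
def calculate_submatrices_alt (row : List Int) : Int :=
  let st := row.foldl
    (fun (st : Int × Int) value =>
      if value = 0 then (st.1 + PySem.Int.floordiv (st.2 * (st.2 + 1)) 2, 0)
      else (st.1, st.2 + 1))
    (0, 0)
  st.1 + PySem.Int.floordiv (st.2 * (st.2 + 1)) 2

-- ===== PRECONDITION & SPEC =====
def Spec_calculate_submatrices (row : List Int) (out : Int) : Prop := out = calculate_submatrices_alt row
instance (row : List Int) (out : Int) : Decidable (Spec_calculate_submatrices row out) := by unfold Spec_calculate_submatrices; infer_instance

-- ===== CLAIM (what is proved, stated in full; the proofs are below) =====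
def Claim_equal_calculate_submatrices : Prop := ∀ (row : List Int), Dom_calculate_submatrices row → Spec_calculate_submatrices row (calculate_submatrices row)

-- ===== LEMMAS AND PROOFS =====

def pvTri (l : Int) : Int := PySem.Int.floordiv (l * (l + 1)) 2

theorem pvTri_succ (l : Int) : pvTri (l + 1) = pvTri l + (l + 1) := by
  unfold pvTri
  rw [PySem.Int.floordiv_eq_ediv_of_pos (h := by omega), PySem.Int.floordiv_eq_ediv_of_pos (h := by omega)]
  have h : (l + 1) * (l + 1 + 1) = l * (l + 1) + (l + 1) * 2 := by ring
  rw [h, Int.add_mul_ediv_right _ _ (by omega)]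

theorem pvTri_zero : pvTri 0 = 0 := by decide

theorem pv_key (row : List Int) : ∀ (c l t : Int), c = t + pvTri l →
    (row.foldl
      (fun (st : Int × Int) value =>
        let length := if value = 0 then 0 else st.2 + 1
        (st.1 + length, length)) (c, l)).1 =
    (row.foldl
      (fun (st : Int × Int) value =>
        if value = 0 then (st.1 + PySem.Int.floordiv (st.2 * (st.2 + 1)) 2, 0)
        else (st.1, st.2 + 1)) (t, l)).1
    + pvTri (row.foldl
      (fun (st : Int × Int) value =>
        if value = 0 then (st.1 + PySem.Int.floordiv (st.2 * (st.2 + 1)) 2, 0)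
        else (st.1, st.2 + 1)) (t, l)).2 := by
  induction row with
  | nil => intro c l t hc; simpa [pvTri] using hc
  | cons v rest ih =>
    intro c l t hc
    by_cases hv : v = 0
    · simp only [List.foldl_cons, hv]
      exact ih (c + 0) 0 (t + PySem.Int.floordiv (l * (l + 1)) 2)
        (by rw [hc, pvTri_zero]; unfold pvTri; omega)
    · simp only [List.foldl_cons, if_neg hv]
      exact ih (c + (l + 1)) (l + 1) t (by rw [hc, pvTri_succ]; ring)

-- ===== VERDICT (by name: the statement is the Claim_ definition above) =====
theorem calculate_submatrices_spec : Claim_equal_calculate_submatrices := by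
  intro row _
  unfold Spec_calculate_submatrices calculate_submatrices calculate_submatrices_alt
  exact pv_key row 0 0 0 (by rw [pvTri_zero]; omega)
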